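-- pv_equiv track=rewrite | github.com/bhayaronaldo/algorithms2023 | src/aditya_algorithms/ArrayAlgorithms/RemoveExtraWhitespaces.py | remove_extra_whitespaces
-- ===== SOURCE A (Python) =====
-- def remove_extra_whitespaces(line: str) -> str:
--     # c.isalpha() means if c is an actual character (alphanumeric) ELSE whitespace
--     # IDEA is to capture all possible cases: there are two va;ues for state - 0 or 1 (2 values),
--     # similarly there are two values for c - either it's a character or a whitespace (2 values):
--     # TOTAL: 2 x 2 values (4 conditions or states to capture)
--     # Notice the 4 case statements checking for these 4 conditions.
--     # for each iteration ONLY 1 condition will be true/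
--     # When we reach that condition we DO WORK
--     STATE = 0  # state is one when you have seen a character (previous character) else it's 0 (previous char was whitespace)
--     new_l = ""
--     for c in line:
--         match c:
--             case x if c.isalpha() and STATE == 0:
--                 STATE = 1
--                 new_l += x
--             case x if not c.isalpha() and STATE == 1:
--                 STATE = 0
--                 new_l += x
--             case x if not c.isalpha() and STATE == 0:
--                 pass
--             case x if c.isalpha() and STATE == 1:
--                 new_l += x
--             case _:
--                 pass
--     return new_l
-- ===== SOURCE B (Python) =====
-- def remove_extra_whitespaces(line: str) -> str:
--     # Run-based recursion: split into alternating alpha/non-alpha runs; keep each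
--     # alpha run whole, keep only the FIRST char of each following non-alpha run,
--     # drop the leading non-alpha run entirely.
--     def take_alpha(cs):          # ports to List.takeWhile isalpha
--         out = []
--         for c in cs:
--             if not c.isalpha():
--                 break
--             out.append(c)
--         return out
--
--     def drop_alpha(cs):          # ports to List.dropWhile isalpha
--         i = 0
--         while i < len(cs) and cs[i].isalpha():
--             i += 1
--         return cs[i:]
--
--     def drop_nonalpha(cs):       # ports to List.dropWhile (not isalpha)
--         i = 0
--         while i < len(cs) and not cs[i].isalpha():
--             i += 1
--         return cs[i:]
--
--     def go(cs):                  # cs starts with an alpha char (or is empty)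
--         if not cs:
--             return []
--         word = take_alpha(cs)
--         rest = drop_alpha(cs)
--         if not rest:
--             return word
--         return word + [rest[0]] + go(drop_nonalpha(rest))
--
--     return ''.join(go(drop_nonalpha(list(line))))
-- ===== Notes on version B (the rewrite author's own statement) =====
-- stated objective: alternative
-- what changed: Replaced A's character-by-character two-state DFA (STATE flag updated per char) with a run-based recursion that splits the string into alternating alpha/non-alpha runs via takeWhile/dropWhile, keeps alpha runs whole and only the first char of each following separator run.
import Mathlib
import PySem

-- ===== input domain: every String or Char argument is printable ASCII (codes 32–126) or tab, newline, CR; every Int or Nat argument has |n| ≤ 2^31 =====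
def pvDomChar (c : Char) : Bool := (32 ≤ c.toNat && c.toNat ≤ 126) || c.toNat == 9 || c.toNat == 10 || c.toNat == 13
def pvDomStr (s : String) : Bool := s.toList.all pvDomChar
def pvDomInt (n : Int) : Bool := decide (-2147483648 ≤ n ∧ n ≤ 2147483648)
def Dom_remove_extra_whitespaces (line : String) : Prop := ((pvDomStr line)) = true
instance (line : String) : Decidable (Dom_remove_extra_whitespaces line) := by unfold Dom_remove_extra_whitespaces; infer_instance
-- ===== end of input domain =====

-- ===== PORT A =====
-- A: two-state (0/1) character-at-a-time machine; the match's four guarded cases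
-- become the same guarded if-chain over the state Int and the accumulator.
def removeStepA (s : Int × List Char) (c : Char) : Int × List Char :=
  if PySem.Chars.isalpha c && s.1 == 0 then (1, s.2 ++ [c])
  else if !(PySem.Chars.isalpha c) && s.1 == 1 then (0, s.2 ++ [c])
  else if !(PySem.Chars.isalpha c) && s.1 == 0 then s
  else if PySem.Chars.isalpha c && s.1 == 1 then (s.1, s.2 ++ [c])
  else s

def remove_extra_whitespaces (line : String) : String :=
  String.ofList (line.toList.foldl removeStepA ((0 : Int), ([] : List Char))).2

-- ===== PORT B =====
-- B (Source B): run-based recursion: drop the leading non-alpha run, then alternately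
-- keep a whole alpha run (takeWhile) and the first char of the following non-alpha run.
def removeGoB : List Char → List Char
  | [] => []
  | c :: t =>
    match h : (c :: t).dropWhile PySem.Chars.isalpha with
    | [] => (c :: t).takeWhile PySem.Chars.isalpha
    | r :: rt =>
      (c :: t).takeWhile PySem.Chars.isalpha ++ [r] ++
        removeGoB (rt.dropWhile (fun x => !PySem.Chars.isalpha x))
termination_by cs => cs.length
decreasing_by
  have h1 : ((c :: t).dropWhile PySem.Chars.isalpha).length ≤ (c :: t).length :=
    List.length_dropWhile_le PySem.Chars.isalpha (c :: t)
  have h2 : (rt.dropWhile (fun x => !PySem.Chars.isalpha x)).length ≤ rt.length :=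
    List.length_dropWhile_le _ rt
  simp only [h, List.length_cons] at h1
  simp only [List.length_cons]
  omega

def remove_extra_whitespaces_alt (line : String) : String :=
  String.ofList (removeGoB (line.toList.dropWhile (fun x => !PySem.Chars.isalpha x)))

-- ===== PRECONDITION & SPEC =====
def Spec_remove_extra_whitespaces (line : String) (out : String) : Prop := out = remove_extra_whitespaces_alt line
instance (line : String) (out : String) : Decidable (Spec_remove_extra_whitespaces line out) := by unfold Spec_remove_extra_whitespaces; infer_instance

-- ===== CLAIM (what is proved, stated in full; the proofs are below) =====
def Claim_equal_remove_extra_whitespaces : Prop := ∀ (line : String), Dom_remove_extra_whitespaces line → Spec_remove_extra_whitespaces line (remove_extra_whitespaces line)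

-- ===== LEMMAS AND PROOFS =====
-- Functional reading of A's DFA: remF0 = behaviour from state 0, remF1 = from state 1.
mutual
def remF0 : List Char → List Char
  | [] => []
  | c :: t => if PySem.Chars.isalpha c then c :: remF1 t else remF0 t
def remF1 : List Char → List Char
  | [] => []
  | c :: t => if PySem.Chars.isalpha c then c :: remF1 t else c :: remF0 t
end

theorem remFoldA (cs : List Char) : ∀ acc : List Char,
    (cs.foldl removeStepA (0, acc)).2 = acc ++ remF0 cs ∧
    (cs.foldl removeStepA (1, acc)).2 = acc ++ remF1 cs := by
  induction cs with
  | nil => intro acc; simp [remF0, remF1]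
  | cons c t ih =>
    intro acc
    by_cases h : PySem.Chars.isalpha c = true <;>
      simp [removeStepA, h, remF0, remF1, ih]

theorem removeGoB_nil : removeGoB [] = [] := by rw [removeGoB.eq_def]

-- one-step unfolding of removeGoB on a cons, as a plain (non-dependent) match
theorem removeGoB_cons (c : Char) (t : List Char) :
    removeGoB (c :: t) =
      (match (c :: t).dropWhile PySem.Chars.isalpha with
      | [] => (c :: t).takeWhile PySem.Chars.isalpha
      | r :: rt => (c :: t).takeWhile PySem.Chars.isalpha ++ [r] ++
          removeGoB (rt.dropWhile (fun x => !PySem.Chars.isalpha x))) := by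
  rw [removeGoB.eq_def]
  split
  · rename_i heq; cases heq
  rename_i heq
  injection heq with a b; subst a; subst b
  split <;> rename_i heq2 <;>
    (split <;> rename_i heq3 <;> rw [heq2] at heq3 <;>
      first
      | rfl
      | cases heq3
      | (injection heq3 with a b; subst a; subst b))
  all_goals rfl

theorem removeGoB_cons_alpha (c : Char) (t : List Char) (h : PySem.Chars.isalpha c = true) :
    removeGoB (c :: t) = c :: removeGoB t := by
  rw [removeGoB_cons]
  cases t with
  | nil =>
    simp [List.dropWhile_cons, List.takeWhile_cons, h, removeGoB_nil]
  | cons d u =>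
    rw [removeGoB_cons]
    simp only [List.dropWhile_cons, List.takeWhile_cons, h, if_pos rfl]
    by_cases hd : PySem.Chars.isalpha d = true <;>
      [skip; simp [hd]]
    cases hw : List.dropWhile PySem.Chars.isalpha u <;> simp [hd, hw]

theorem removeGoB_cons_nonalpha (c : Char) (t : List Char) (h : PySem.Chars.isalpha c = false) :
    removeGoB (c :: t) = c :: removeGoB (t.dropWhile (fun x => !PySem.Chars.isalpha x)) := by
  rw [removeGoB_cons]
  simp [List.takeWhile_cons, List.dropWhile_cons, h]

theorem remF_eq_goB (cs : List Char) :
    remF0 cs = removeGoB (cs.dropWhile (fun x => !PySem.Chars.isalpha x)) ∧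
    remF1 cs = removeGoB cs := by
  induction cs with
  | nil => simp [remF0, remF1, removeGoB_nil]
  | cons c t ih =>
    by_cases h : PySem.Chars.isalpha c = true
    · constructor
      · simp [remF0, h, List.dropWhile_cons, removeGoB_cons_alpha c t h, ih.2]
      · simp [remF1, h, removeGoB_cons_alpha c t h, ih.2]
    · have hf : PySem.Chars.isalpha c = false := eq_false_of_ne_true h
      constructor
      · simp [remF0, hf, List.dropWhile_cons, ih.1]
      · simp [remF1, hf, removeGoB_cons_nonalpha c t hf, ih.1]

-- ===== VERDICT (by name: the statement is the Claim_ definition above) =====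
theorem remove_extra_whitespaces_spec : Claim_equal_remove_extra_whitespaces := by
  intro line _
  unfold Spec_remove_extra_whitespaces remove_extra_whitespaces remove_extra_whitespaces_alt
  rw [(remFoldA line.toList []).1, List.nil_append, (remF_eq_goB line.toList).1]
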